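-- pv_equiv track=rewrite | github.com/ydb-platform/ydb | contrib/python/marko/marko/inline_parser.py | _parse_link_separator
-- ===== SOURCE A (Python) =====
-- WHITESPACE = " \n\t"
--
-- def _parse_link_separator(text: str, start: int) -> int:
--     i = start
--     has_newline = False
--     while i < len(text):
--         if text[i] == "\n":
--             if has_newline:
--                 break
--             has_newline = True
--         elif text[i] not in WHITESPACE:
--             break
--         i += 1
--     return i
-- ===== SOURCE B (Python) =====
-- # B: two-phase skip (spaces/tabs, then an optional single newline, then spaces/tabs)
-- # instead of A's single loop with a has_newline flag.
-- def _skip_inline_ws(text, j):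
--     while j < len(text) and text[j] in " \t":
--         j += 1
--     return j
--
-- def _parse_link_separator(text: str, start: int) -> int:
--     j = _skip_inline_ws(text, start)
--     if j < len(text) and text[j] == "\n":
--         j = _skip_inline_ws(text, j + 1)
--     return j
-- ===== Notes on version B (the rewrite author's own statement) =====
-- stated objective: simpler
-- what changed: Replaces the single scanning loop with a has_newline boolean flag by a flag-free two-phase decomposition: skip a run of spaces/tabs, consume at most one newline, skip another run of spaces/tabs.
import Mathlib
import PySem

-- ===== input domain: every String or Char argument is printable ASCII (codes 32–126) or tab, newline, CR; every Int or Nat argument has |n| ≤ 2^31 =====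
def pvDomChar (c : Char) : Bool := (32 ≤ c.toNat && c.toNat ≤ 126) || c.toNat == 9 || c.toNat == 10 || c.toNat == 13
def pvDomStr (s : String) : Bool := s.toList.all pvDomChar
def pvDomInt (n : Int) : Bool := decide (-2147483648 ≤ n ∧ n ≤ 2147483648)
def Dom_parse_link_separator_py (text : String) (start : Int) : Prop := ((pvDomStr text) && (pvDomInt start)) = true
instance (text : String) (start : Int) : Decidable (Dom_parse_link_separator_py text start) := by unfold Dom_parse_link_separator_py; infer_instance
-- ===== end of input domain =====

-- B replaces A's flagged scanning loop by a two-phase skip (spaces/tabs, optional single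
-- newline, spaces/tabs); same return value wherever A returns.


-- ===== PORT A =====
-- A's while loop: i scans from start; a '\n' is allowed once (has_newline flag),
-- other whitespace (' ', '\t') is consumed, anything else breaks.
-- On the IndexError inputs (i < -len, excluded by Pre_) pyGet? is none and we return i.
def pvLoopA (text : String) (i : Int) (has_newline : Bool) : Int :=
  if _h : i < PySem.Str.len text then
    match PySem.Str.pyGet? text i with
    | none => i  -- Python raises IndexError here; outside Pre_
    | some c =>
      if c = '\n' then
        if has_newline then i else pvLoopA text (i + 1) true
      else if ¬ (c = ' ' ∨ c = '\n' ∨ c = '\t') then i   -- `text[i] not in WHITESPACE`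
      else pvLoopA text (i + 1) has_newline
  else i
termination_by (PySem.Str.len text - i).toNat
decreasing_by all_goals (simp only [PySem.Str.len_eq] at *; omega)

def parse_link_separator_py (text : String) (start : Int) : Int :=
  pvLoopA text start false

-- ===== PORT B =====
-- helper _skip_inline_ws: advance past a run of spaces/tabs
def pvSkipWS (text : String) (j : Int) : Int :=
  if _h : j < PySem.Str.len text then
    match PySem.Str.pyGet? text j with
    | none => j  -- Python raises IndexError here; outside Pre_
    | some c => if c = ' ' ∨ c = '\t' then pvSkipWS text (j + 1) else j
  else j
termination_by (PySem.Str.len text - j).toNat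
decreasing_by simp only [PySem.Str.len_eq] at *; omega

def parse_link_separator_py_alt (text : String) (start : Int) : Int :=
  let j := pvSkipWS text start
  if j < PySem.Str.len text ∧ PySem.Str.pyGet? text j = some '\n' then
    pvSkipWS text (j + 1)
  else j

-- ===== PRECONDITION & SPEC =====
-- Pre_ excludes start < -len(text), where Python's negative indexing makes A (and B) raise IndexError.
def Pre_parse_link_separator_py (text : String) (start : Int) : Prop :=
  -(PySem.Str.len text) ≤ start
instance (text : String) (start : Int) : Decidable (Pre_parse_link_separator_py text start) := by
  unfold Pre_parse_link_separator_py; infer_instance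

def pvWitness_parse_link_separator_py : String × Int := (" \n x", 0)

def Spec_parse_link_separator_py (text : String) (start : Int) (out : Int) : Prop := out = parse_link_separator_py_alt text start
instance (text : String) (start : Int) (out : Int) : Decidable (Spec_parse_link_separator_py text start out) := by unfold Spec_parse_link_separator_py; infer_instance

-- ===== CLAIM (what is proved, stated in full; the proofs are below) =====
def Claim_equal_parse_link_separator_py : Prop := ∀ (text : String) (start : Int), Dom_parse_link_separator_py text start → Pre_parse_link_separator_py text start → Spec_parse_link_separator_py text start (parse_link_separator_py text start)

-- ===== LEMMAS AND PROOFS =====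

-- small step lemmas for B's helper pvSkipWS
lemma pvSkipWS_stop (text : String) (i : Int) (h : ¬ i < PySem.Str.len text) :
    pvSkipWS text i = i := by
  rw [pvSkipWS, dif_neg h]

lemma pvSkipWS_none (text : String) (i : Int) (hg : PySem.Str.pyGet? text i = none) :
    pvSkipWS text i = i := by
  rw [pvSkipWS]
  by_cases h : i < PySem.Str.len text
  · rw [dif_pos h, hg]
  · rw [dif_neg h]

lemma pvSkipWS_step (text : String) (i : Int) (c : Char) (h : i < PySem.Str.len text)
    (hg : PySem.Str.pyGet? text i = some c) (hc : c = ' ' ∨ c = '\t') :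
    pvSkipWS text i = pvSkipWS text (i + 1) := by
  rw [pvSkipWS, dif_pos h, hg]
  simp [hc]

lemma pvSkipWS_other (text : String) (i : Int) (c : Char)
    (hg : PySem.Str.pyGet? text i = some c) (hc : ¬ (c = ' ' ∨ c = '\t')) :
    pvSkipWS text i = i := by
  rw [pvSkipWS]
  by_cases h : i < PySem.Str.len text
  · rw [dif_pos h, hg]; simp [hc]
  · rw [dif_neg h]

-- Once the newline has been seen, A's loop consumes exactly a run of spaces/tabs.
lemma pvLoopA_true (text : String) (n : Nat) :
    ∀ i : Int, (PySem.Str.len text - i).toNat ≤ n → pvLoopA text i true = pvSkipWS text i := by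
  induction n with
  | zero =>
    intro i h
    have hlt : ¬ i < PySem.Str.len text := by
      simp only [PySem.Str.len_eq] at h ⊢; omega
    rw [pvLoopA, dif_neg hlt, pvSkipWS_stop text i hlt]
  | succ n ih =>
    intro i h
    by_cases hlt : i < PySem.Str.len text
    · rw [pvLoopA, dif_pos hlt]
      cases hg : PySem.Str.pyGet? text i with
      | none => simp only []; exact (pvSkipWS_none text i hg).symm
      | some c =>
        simp only []
        have hm : (PySem.Str.len text - (i + 1)).toNat ≤ n := by
          simp only [PySem.Str.len_eq] at h hlt ⊢; omega
        by_cases hn : c = '\n'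
        · rw [if_pos hn]
          simp only [if_true]
          exact (pvSkipWS_other text i c hg (by simp [hn])).symm
        · by_cases hs : c = ' ' ∨ c = '\t'
          · have hmem : ¬ ¬ (c = ' ' ∨ c = '\n' ∨ c = '\t') := by tauto
            rw [if_neg hn, if_neg hmem, ih (i + 1) hm,
                ← pvSkipWS_step text i c hlt hg hs]
          · have hmem : ¬ (c = ' ' ∨ c = '\n' ∨ c = '\t') := by tauto
            rw [if_neg hn, if_pos hmem]
            exact (pvSkipWS_other text i c hg hs).symm
    · rw [pvLoopA, dif_neg hlt, pvSkipWS_stop text i hlt]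

-- A's loop before any newline equals B's two-phase computation started at i.
lemma pvLoopA_false (text : String) (n : Nat) :
    ∀ i : Int, (PySem.Str.len text - i).toNat ≤ n →
      pvLoopA text i false = parse_link_separator_py_alt text i := by
  induction n with
  | zero =>
    intro i h
    have hlt : ¬ i < PySem.Str.len text := by
      simp only [PySem.Str.len_eq] at h ⊢; omega
    rw [pvLoopA, dif_neg hlt]
    simp only [parse_link_separator_py_alt]
    rw [pvSkipWS_stop text i hlt, if_neg (fun hc => hlt hc.1)]
  | succ n ih =>
    intro i h
    by_cases hlt : i < PySem.Str.len text
    · rw [pvLoopA, dif_pos hlt]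
      cases hg : PySem.Str.pyGet? text i with
      | none =>
        simp only [parse_link_separator_py_alt]
        rw [pvSkipWS_none text i hg,
            if_neg (fun hc => by rw [hg] at hc; exact absurd hc.2 (by decide))]
      | some c =>
        simp only []
        have hm : (PySem.Str.len text - (i + 1)).toNat ≤ n := by
          simp only [PySem.Str.len_eq] at h hlt ⊢; omega
        by_cases hn : c = '\n'
        · -- the single allowed newline: A flips the flag, B consumes it and skips again
          have hcond : i < PySem.Str.len text ∧ PySem.Str.pyGet? text i = some '\n' :=
            ⟨hlt, by rw [hg, hn]⟩
          rw [if_pos hn, pvLoopA_true text n (i + 1) hm]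
          simp only [parse_link_separator_py_alt]
          rw [pvSkipWS_other text i c hg (by simp [hn]), if_neg Bool.false_ne_true,
              if_pos hcond]
        · by_cases hs : c = ' ' ∨ c = '\t'
          · -- space/tab: both sides step to i + 1
            have hmem : ¬ ¬ (c = ' ' ∨ c = '\n' ∨ c = '\t') := by tauto
            rw [if_neg hn, if_neg hmem, ih (i + 1) hm]
            simp only [parse_link_separator_py_alt]
            rw [← pvSkipWS_step text i c hlt hg hs]
          · -- any other character stops both sides at i
            have hmem : ¬ (c = ' ' ∨ c = '\n' ∨ c = '\t') := by tauto
            rw [if_neg hn, if_pos hmem]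
            simp only [parse_link_separator_py_alt]
            rw [pvSkipWS_other text i c hg hs,
                if_neg (fun hc => hn (Option.some.inj (hg ▸ hc.2)))]
    · rw [pvLoopA, dif_neg hlt]
      simp only [parse_link_separator_py_alt]
      rw [pvSkipWS_stop text i hlt, if_neg (fun hc => hlt hc.1)]

-- ===== VERDICT (by name: the statement is the Claim_ definition above) =====
theorem parse_link_separator_py_spec : Claim_equal_parse_link_separator_py := by
  intro text start _ _
  unfold Spec_parse_link_separator_py parse_link_separator_py
  exact pvLoopA_false text (PySem.Str.len text - start).toNat start le_rfl
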